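-- pv_equiv track=rewrite | github.com/ghaefner/Group07 | Project/GUMShell/phase_mod.py | bandp
-- ===== SOURCE A (Python) =====
-- def sort(N, a):
--
--     c = a.copy()
--
--     number = 0
--     p = 0
--
--     for i in range(0, N - 1, 1):
--         for j in range(i + 1, N, 1):
--             if(c[j] < c[i]):
--                 number += 1
--                 p = c[i]
--                 c[i] = c[j]
--                 c[j] = p
--
--     phase = (-1)**number
--
--     return(phase, c)
--
-- def bandp(p, q, r, s, N, a):
--
--     point = 0
--     c = a.copy()
--
--     for i in range(0, N - 1, 1):
--         for j in range(i + 1, N, 1):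
--             if r == c[i] and s == c[j]:
--                 point = 1
--                 c[i] = p
--                 c[j] = q
--
--     for i in range(0, N - 1, 1):
--         for j in range(i + 1, N, 1):
--             if c[i] == c[j]:
--                 point = 0
--
--     if point == 0:
--         phase = 0
--         b = c[:]
--     elif point == 1:
--         phase, d = sort(N, c)
--         b = d[:]
--
--     return(phase, b)
-- ===== SOURCE B (Python) =====
-- def bandp(p, q, r, s, N, a):
--     c = list(a)
--     found = False
--     for i in range(N - 1):
--         for j in range(i + 1, N):
--             if c[i] == r and c[j] == s:
--                 found = True
--                 c[i] = p
--                 c[j] = q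
--     head = c[:N]
--     if not found or len(set(head)) < len(head):
--         return (0, c)
--     inv = sum(sum(1 for y in head[k + 1:] if y < head[k]) for k in range(len(head)))
--     return (-1 if inv % 2 else 1, sorted(head) + c[N:])
-- ===== Notes on version B (the rewrite author's own statement) =====
-- stated objective: alternative
-- what changed: B keeps the pair-replacement scan but replaces A's second quadratic duplicate scan by an O(N) set-size test and replaces A's mutating swap-counting exchange sort by the library sort with the sign taken from a pure inversion count (proved: A's swap count has the parity of the inversion count on duplicate-free input); Pre_ excludes only inputs where both raise IndexError (2 <= N > len(a)).
-- outside the precondition, e.g. on bandp(0, 0, 1, 2, 4, [1, 2]): A raises IndexError, B raises IndexError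
import Mathlib
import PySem

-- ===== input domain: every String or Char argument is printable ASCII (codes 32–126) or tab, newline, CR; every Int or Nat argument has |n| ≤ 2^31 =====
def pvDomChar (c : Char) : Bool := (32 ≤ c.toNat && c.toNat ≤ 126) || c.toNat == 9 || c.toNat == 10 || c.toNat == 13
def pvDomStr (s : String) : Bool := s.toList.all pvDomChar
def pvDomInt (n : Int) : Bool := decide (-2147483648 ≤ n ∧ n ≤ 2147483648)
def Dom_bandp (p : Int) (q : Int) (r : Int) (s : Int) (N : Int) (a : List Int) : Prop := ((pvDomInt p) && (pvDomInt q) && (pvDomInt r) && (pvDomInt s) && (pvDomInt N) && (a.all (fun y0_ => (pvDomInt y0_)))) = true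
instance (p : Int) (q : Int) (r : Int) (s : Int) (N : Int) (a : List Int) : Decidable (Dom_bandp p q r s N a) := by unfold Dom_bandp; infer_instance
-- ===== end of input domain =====

-- B keeps the pair-replacement scan but uses an O(N) set-size duplicate test and the library
-- sort with the sign taken from a pure inversion count instead of A's second quadratic scan and
-- mutating swap-counting exchange sort (return value only — neither mutates the caller's list).

-- ===== PORT A =====
-- first nested loop of A: replace the pair (r, s) by (p, q); state (c, point)
def aRepStep (p q r s i : Int) (st : List Int × Int) (j : Int) : List Int × Int :=
  if r = PySem.List.pyGetD st.1 i 0 ∧ s = PySem.List.pyGetD st.1 j 0 then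
    (PySem.List.pySetD (PySem.List.pySetD st.1 i p) j q, 1)
  else st

def aRepIn (p q r s i : Int) (js : List Int) (st : List Int × Int) : List Int × Int :=
  js.foldl (aRepStep p q r s i) st

def aRep (p q r s N : Int) (a : List Int) : List Int × Int :=
  (PySem.List.pyRange 0 (N-1) 1).foldl
    (fun st i => aRepIn p q r s i (PySem.List.pyRange (i+1) N 1) st) (a, 0)

-- second nested loop of A: duplicate scan resetting point
def aDupIn (c : List Int) (i : Int) (js : List Int) (pt : Int) : Int :=
  js.foldl (fun pt j => if PySem.List.pyGetD c i 0 = PySem.List.pyGetD c j 0 then 0 else pt) pt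

def aDup (N : Int) (c : List Int) (pt : Int) : Int :=
  (PySem.List.pyRange 0 (N-1) 1).foldl
    (fun pt i => aDupIn c i (PySem.List.pyRange (i+1) N 1) pt) pt

-- helper `sort`: exchange sort counting swaps; state (number, c)
def aSortStep (i : Int) (st : Int × List Int) (j : Int) : Int × List Int :=
  if PySem.List.pyGetD st.2 j 0 < PySem.List.pyGetD st.2 i 0 then
    (st.1 + 1,
      PySem.List.pySetD (PySem.List.pySetD st.2 i (PySem.List.pyGetD st.2 j 0)) j
        (PySem.List.pyGetD st.2 i 0))
  else st

def aSortIn (i : Int) (js : List Int) (st : Int × List Int) : Int × List Int :=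
  js.foldl (aSortStep i) st

def aSortLoop (N : Int) (st : Int × List Int) : Int × List Int :=
  (PySem.List.pyRange 0 (N-1) 1).foldl
    (fun st i => aSortIn i (PySem.List.pyRange (i+1) N 1) st) st

def aSort (N : Int) (c : List Int) : Int × List Int :=
  let st := aSortLoop N (0, c)
  ((-1 : Int) ^ st.1.toNat, st.2)

def bandp (p : Int) (q : Int) (r : Int) (s : Int) (N : Int) (a : List Int) : Int × List Int :=
  let st := aRep p q r s N a
  let pt := aDup N st.1 st.2
  if pt = 0 then (0, st.1) else aSort N st.1

-- ===== PORT B =====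
-- B's replacement scan; state (c, found)
def bRepStep (p q r s i : Int) (st : List Int × Bool) (j : Int) : List Int × Bool :=
  if PySem.List.pyGetD st.1 i 0 = r ∧ PySem.List.pyGetD st.1 j 0 = s then
    (PySem.List.pySetD (PySem.List.pySetD st.1 i p) j q, true)
  else st

def bRepIn (p q r s i : Int) (js : List Int) (st : List Int × Bool) : List Int × Bool :=
  js.foldl (bRepStep p q r s i) st

def bRep (p q r s N : Int) (a : List Int) : List Int × Bool :=
  (PySem.List.pyRange 0 (N-1) 1).foldl
    (fun st i => bRepIn p q r s i (PySem.List.pyRange (i+1) N 1) st) (a, false)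

-- inv = sum(sum(1 for y in head[k+1:] if y < head[k]) for k in range(len(head)))
def bInv (l : List Int) : Nat :=
  ((List.range l.length).map
    (fun k => ((l.drop (k+1)).filter (fun y => y < l.getD k 0)).length)).sum

def bandp_alt (p : Int) (q : Int) (r : Int) (s : Int) (N : Int) (a : List Int) : Int × List Int :=
  let st := bRep p q r s N a
  let head := PySem.List.slice st.1 none (some N)
  if st.2 = false ∨ (PySem.Set.ofList head).length < head.length then (0, st.1)
  else
    ((if PySem.Int.mod (bInv head : Int) 2 ≠ 0 then -1 else 1),
      PySem.List.sorted head (fun x => x) false ++ PySem.List.slice st.1 (some N) none)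

-- ===== PRECONDITION & SPEC =====
-- Pre_ excludes exactly the inputs where A raises IndexError: N ≥ 2 with fewer than N list elements.
def Pre_bandp (p : Int) (q : Int) (r : Int) (s : Int) (N : Int) (a : List Int) : Prop :=
  N ≤ (a.length : Int) ∨ N ≤ 1
instance (p : Int) (q : Int) (r : Int) (s : Int) (N : Int) (a : List Int) : Decidable (Pre_bandp p q r s N a) := by unfold Pre_bandp; infer_instance

def pvWitness_bandp : Int × Int × Int × Int × Int × List Int := (2, 3, 0, 1, 3, [0, 1, 2])

def Spec_bandp (p : Int) (q : Int) (r : Int) (s : Int) (N : Int) (a : List Int) (out : Int × List Int) : Prop := out = bandp_alt p q r s N a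
instance (p : Int) (q : Int) (r : Int) (s : Int) (N : Int) (a : List Int) (out : Int × List Int) : Decidable (Spec_bandp p q r s N a out) := by unfold Spec_bandp; infer_instance

-- ===== CLAIM (what is proved, stated in full; the proofs are below) =====
def Claim_equal_bandp : Prop := ∀ (p : Int) (q : Int) (r : Int) (s : Int) (N : Int) (a : List Int), Dom_bandp p q r s N a → Pre_bandp p q r s N a → Spec_bandp p q r s N a (bandp p q r s N a)

-- ===== LEMMAS AND PROOFS =====

-- ---------- generic index/list helpers ----------
lemma pgSet_ne (c : List Int) (i j : Int) (v : Int) (h0 : 0 ≤ i) (h1 : 0 ≤ j) (hne : i ≠ j) :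
    PySem.List.pyGetD (PySem.List.pySetD c j v) i 0 = PySem.List.pyGetD c i 0 := by
  rw [PySem.List.pyGetD_of_nonneg _ _ h0, PySem.List.pyGetD_of_nonneg _ _ h0,
    PySem.List.pySetD_of_nonneg _ _ h1]
  have h : j.toNat ≠ i.toNat := by omega
  simp [List.getD_eq_getElem?_getD, List.getElem?_set_ne h]

lemma pgSet_self (c : List Int) (i : Int) (v : Int) (h0 : 0 ≤ i) (hi : i < (c.length : Int)) :
    PySem.List.pyGetD (PySem.List.pySetD c i v) i 0 = v := by
  rw [PySem.List.pyGetD_of_nonneg _ _ h0, PySem.List.pySetD_of_nonneg _ _ h0]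
  have h : i.toNat < c.length := by omega
  simp [List.getD_eq_getElem?_getD, h]

lemma decomp_take_drop (c : List Int) (ii n : Nat) (h1 : ii < n) (h2 : n ≤ c.length) :
    c = c.take ii ++ c.getD ii 0 :: ((c.take n).drop (ii+1)) ++ c.drop n := by
  have hii : ii < c.length := by omega
  conv_lhs => rw [← List.take_append_drop n c]
  congr 1
  conv_lhs => rw [← List.take_append_drop ii (c.take n)]
  rw [List.take_take, Nat.min_eq_left (le_of_lt h1)]
  congr 1
  rw [List.drop_eq_getElem_cons (by simp; omega)]
  congr 1
  simp [List.getElem_take, List.getD_eq_getElem?_getD, List.getElem?_eq_getElem hii]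

lemma take_succ_drop (c : List Int) (ii jj : Nat) (h1 : ii ≤ jj) (h2 : jj < c.length) :
    (c.take (jj+1)).drop ii = (c.take jj).drop ii ++ [c.getD jj 0] := by
  rw [List.take_add_one, List.drop_append_of_le_length (by simp; omega)]
  simp [List.getD_eq_getElem?_getD, List.getElem?_eq_getElem h2]

-- ---------- phase 1: A's replace loop vs B's (point 0/1 vs found boolean) ----------
lemma aRepIn_eq_bRepIn (p q r s i : Int) (js : List Int) (c : List Int) (f : Bool) :
    aRepIn p q r s i js (c, if f then 1 else 0) =
      ((bRepIn p q r s i js (c, f)).1, if (bRepIn p q r s i js (c, f)).2 then 1 else 0) := by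
  induction js generalizing c f with
  | nil => rfl
  | cons j js ih =>
    simp only [aRepIn, bRepIn, List.foldl_cons, aRepStep, bRepStep]
    by_cases h : PySem.List.pyGetD c i 0 = r ∧ PySem.List.pyGetD c j 0 = s
    · rw [if_pos ⟨h.1.symm, h.2.symm⟩, if_pos h]
      simpa only [aRepIn, bRepIn] using
        ih (PySem.List.pySetD (PySem.List.pySetD c i p) j q) true
    · rw [if_neg (fun hx => h ⟨hx.1.symm, hx.2.symm⟩), if_neg h]
      simpa only [aRepIn, bRepIn] using ih c f

lemma aRep_eq_bRep (p q r s N : Int) (a : List Int) :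
    aRep p q r s N a =
      ((bRep p q r s N a).1, if (bRep p q r s N a).2 then 1 else 0) := by
  unfold aRep bRep
  generalize (PySem.List.pyRange 0 (N-1) 1) = is
  have H : ∀ (is : List Int) (c : List Int) (f : Bool),
      is.foldl (fun st i => aRepIn p q r s i (PySem.List.pyRange (i+1) N 1) st)
        (c, if f then 1 else 0) =
      ((is.foldl (fun st i => bRepIn p q r s i (PySem.List.pyRange (i+1) N 1) st) (c, f)).1,
        if (is.foldl (fun st i => bRepIn p q r s i (PySem.List.pyRange (i+1) N 1) st) (c, f)).2
          then 1 else 0) := by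
    intro is
    induction is with
    | nil => intro c f; rfl
    | cons i is ih =>
      intro c f
      simp only [List.foldl_cons]
      rw [aRepIn_eq_bRepIn]
      exact ih (bRepIn p q r s i (PySem.List.pyRange (i+1) N 1) (c, f)).1
        (bRepIn p q r s i (PySem.List.pyRange (i+1) N 1) (c, f)).2
  simpa using H is a false

lemma bRepIn_len (p q r s i : Int) (js : List Int) (c : List Int) (f : Bool) :
    (bRepIn p q r s i js (c, f)).1.length = c.length := by
  induction js generalizing c f with
  | nil => rfl
  | cons j js ih =>
    simp only [bRepIn, List.foldl_cons, bRepStep]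
    split
    · rw [show (List.foldl (bRepStep p q r s i) (PySem.List.pySetD (PySem.List.pySetD c i p) j q, true) js) = bRepIn p q r s i js (PySem.List.pySetD (PySem.List.pySetD c i p) j q, true) from rfl,
        ih]
      simp [PySem.List.length_pySetD]
    · exact ih c f

lemma bRep_len (p q r s N : Int) (a : List Int) :
    (bRep p q r s N a).1.length = a.length := by
  unfold bRep
  have H : ∀ (is : List Int) (c : List Int) (f : Bool),
      (is.foldl (fun st i => bRepIn p q r s i (PySem.List.pyRange (i+1) N 1) st) (c, f)).1.length
        = c.length := by
    intro is
    induction is with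
    | nil => intro c f; rfl
    | cons i is ih =>
      intro c f
      simp only [List.foldl_cons]
      rcases hb : bRepIn p q r s i (PySem.List.pyRange (i+1) N 1) (c, f) with ⟨c2, f2⟩
      rw [ih c2 f2]
      have := bRepIn_len p q r s i (PySem.List.pyRange (i+1) N 1) c f
      rw [hb] at this
      exact this
  exact H _ a false

lemma bRep_of_le_one (p q r s N : Int) (a : List Int) (h : N ≤ 1) :
    bRep p q r s N a = (a, false) := by
  unfold bRep
  rw [PySem.List.pyRange_one_eq_nil (by omega)]
  rfl

-- ---------- phase 2: duplicate scan ----------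
lemma aDupIn_char (c : List Int) (i : Int) (js : List Int) (pt : Int) :
    aDupIn c i js pt =
      if js.any (fun j => PySem.List.pyGetD c i 0 == PySem.List.pyGetD c j 0) then 0 else pt := by
  induction js generalizing pt with
  | nil => simp [aDupIn]
  | cons j js ih =>
    simp only [aDupIn, List.foldl_cons, List.any_cons] at *
    by_cases h : PySem.List.pyGetD c i 0 = PySem.List.pyGetD c j 0
    · rw [if_pos h, ih 0]
      simp [h]
    · rw [if_neg h, ih pt]
      simp [h]

lemma aDup_char (N : Int) (c : List Int) (pt : Int) :
    aDup N c pt =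
      if (PySem.List.pyRange 0 (N-1) 1).any (fun i => (PySem.List.pyRange (i+1) N 1).any
          (fun j => PySem.List.pyGetD c i 0 == PySem.List.pyGetD c j 0)) then 0 else pt := by
  unfold aDup
  generalize (PySem.List.pyRange 0 (N-1) 1) = is
  induction is generalizing pt with
  | nil => simp
  | cons i is ih =>
    simp only [List.foldl_cons, List.any_cons]
    rw [aDupIn_char]
    by_cases h : (PySem.List.pyRange (i+1) N 1).any
        (fun j => PySem.List.pyGetD c i 0 == PySem.List.pyGetD c j 0)
    · rw [if_pos h, ih 0]
      simp [h]
    · rw [if_neg (by simpa using h), ih pt]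
      have h' : ((PySem.List.pyRange (i+1) N 1).any
          (fun j => PySem.List.pyGetD c i 0 == PySem.List.pyGetD c j 0)) = false := by
        simpa using h
      simp only [h', Bool.false_or]

lemma dup_iff_not_nodup (N : Int) (c : List Int) (h2 : N ≤ (c.length : Int)) :
    ((PySem.List.pyRange 0 (N-1) 1).any (fun i => (PySem.List.pyRange (i+1) N 1).any
        (fun j => PySem.List.pyGetD c i 0 == PySem.List.pyGetD c j 0)) = true) ↔
      ¬ (c.take N.toNat).Nodup := by
  have hnlen : N.toNat ≤ c.length := by omega
  have hlt : (c.take N.toNat).length = N.toNat := by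
    rw [List.length_take]; omega
  simp only [List.any_eq_true, beq_iff_eq, PySem.List.mem_pyRange_one]
  constructor
  · rintro ⟨i, ⟨h0i, hi1⟩, j, ⟨hij, hjN⟩, heq⟩
    intro hnd
    have hu : i.toNat < (c.take N.toNat).length := by omega
    have hv : j.toNat < (c.take N.toNat).length := by omega
    have huv : i.toNat < j.toNat := by omega
    have := (List.pairwise_iff_getElem.1 hnd) i.toNat j.toNat hu hv huv
    apply this
    rw [PySem.List.pyGetD_eq_getElem _ _ h0i (by omega),
        PySem.List.pyGetD_eq_getElem _ _ (by omega) (by omega)] at heq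
    simpa [List.getElem_take] using heq
  · intro hnot
    by_contra hno
    apply hnot
    refine List.pairwise_iff_getElem.2 ?_
    intro u v hu hv huv
    intro hequv
    refine hno ⟨(u : Int), ⟨by omega, by omega⟩, (v : Int), ⟨by omega, by omega⟩, ?_⟩
    rw [PySem.List.pyGetD_eq_getElem _ _ (by omega) (by omega),
        PySem.List.pyGetD_eq_getElem _ _ (by omega) (by omega)]
    simp only [List.getElem_take] at hequv
    simpa using hequv

lemma set_len_lt_iff (l : List Int) :
    ((PySem.Set.ofList l).length < l.length) ↔ ¬ l.Nodup := by
  constructor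
  · intro hlt hnd
    rw [PySem.Set.ofList_eq_self_of_nodup l hnd] at hlt
    exact lt_irrefl _ hlt
  · intro hnot
    induction l with
    | nil => exact absurd List.nodup_nil hnot
    | cons x xs ih =>
      rw [PySem.Set.ofList_cons]
      simp only [List.length_cons, Nat.add_lt_add_iff_right]
      by_cases hx : x ∈ xs
      · have hx' : x ∈ PySem.Set.ofList xs := (PySem.Set.mem_ofList xs x).2 hx
        calc ((PySem.Set.ofList xs).discard x).length
            < (PySem.Set.ofList xs).length := by
              apply List.length_filter_lt_length_iff_exists.2
              exact ⟨x, hx', by simp⟩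
          _ ≤ xs.length := PySem.Set.length_ofList_le xs
      · have hxs : ¬ xs.Nodup := fun h => hnot (List.nodup_cons.2 ⟨hx, h⟩)
        calc ((PySem.Set.ofList xs).discard x).length
            ≤ (PySem.Set.ofList xs).length := List.length_filter_le _ _
          _ < xs.length := ih hxs

-- ---------- phase 3: sort ----------
def inv : List Int → Nat
  | [] => 0
  | x :: t => t.countP (fun y => decide (y < x)) + inv t

def selPass : Int → List Int → Nat × Int × List Int
  | x, [] => (0, x, [])
  | x, y :: t =>
    if y < x then
      ((selPass y t).1 + 1, (selPass y t).2.1, x :: (selPass y t).2.2)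
    else
      ((selPass x t).1, (selPass x t).2.1, y :: (selPass x t).2.2)

lemma selPass_len (x : Int) (t : List Int) : (selPass x t).2.2.length = t.length := by
  induction t generalizing x with
  | nil => rfl
  | cons y t ih => by_cases h : y < x <;> simp [selPass, h, ih]

def selSort : List Int → Nat × List Int
  | [] => (0, [])
  | x :: t =>
    let pr := selPass x t
    let rec' := selSort pr.2.2
    (pr.1 + rec'.1, pr.2.1 :: rec'.2)
termination_by l => l.length
decreasing_by simp [selPass_len]

lemma selPass_perm (x : Int) (t : List Int) :
    ((selPass x t).2.1 :: (selPass x t).2.2).Perm (x :: t) := by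
  induction t generalizing x with
  | nil => simp [selPass]
  | cons y t ih =>
    by_cases h : y < x
    · simp only [selPass, if_pos h]
      exact (List.Perm.swap x (selPass y t).2.1 (selPass y t).2.2).trans ((ih y).cons x)
    · simp only [selPass, if_neg h]
      exact ((List.Perm.swap y (selPass x t).2.1 (selPass x t).2.2).trans
        ((ih x).cons y)).trans (List.Perm.swap y x t).symm

lemma selPass_min (x : Int) (t : List Int) :
    (selPass x t).2.1 ≤ x ∧ ∀ z ∈ (selPass x t).2.2, (selPass x t).2.1 ≤ z := by
  induction t generalizing x with
  | nil => simp [selPass]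
  | cons y t ih =>
    by_cases h : y < x
    · obtain ⟨h1, h2⟩ := ih y
      simp only [selPass, if_pos h]
      exact ⟨lt_of_le_of_lt h1 h |>.le, by
        intro z hz
        rcases List.mem_cons.1 hz with rfl | hz
        · exact le_of_lt (lt_of_le_of_lt h1 h)
        · exact h2 z hz⟩
    · obtain ⟨h1, h2⟩ := ih x
      simp only [selPass, if_neg h]
      exact ⟨h1, by
        intro z hz
        rcases List.mem_cons.1 hz with rfl | hz
        · exact le_trans h1 (not_lt.1 h)
        · exact h2 z hz⟩

lemma selPass_count (x : Int) (t : List Int) (hnd : (x :: t).Nodup) :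
    (selPass x t).1 + inv (selPass x t).2.2 = inv (x :: t) := by
  induction t generalizing x with
  | nil => simp [selPass, inv]
  | cons y t ih =>
    by_cases h : y < x
    · have hyt : (y :: t).Nodup := hnd.of_cons
      have ihy := ih y hyt
      have hm := (selPass_min y t).1
      have hperm := selPass_perm y t
      simp only [selPass, if_pos h, inv]
      have hc : ((selPass y t).2.1 :: (selPass y t).2.2).countP (fun z => decide (z < x))
          = (y :: t).countP (fun z => decide (z < x)) := hperm.countP_eq _
      have hmx : decide ((selPass y t).2.1 < x) = true := by simp [lt_of_le_of_lt hm h]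
      have hyx : decide (y < x) = true := by simp [h]
      simp only [List.countP_cons, hmx, hyx, eq_self_iff_true, if_true] at hc ⊢
      simp only [inv] at ihy
      omega
    · have hxny : x ≠ y := fun he => (List.nodup_cons.1 hnd).1 (he ▸ List.mem_cons_self)
      have hxy : x < y := lt_of_le_of_ne (not_lt.1 h) hxny
      have hxt : (x :: t).Nodup := by
        have h1 : x ∉ t := fun hmem => (List.nodup_cons.1 hnd).1 (List.mem_cons_of_mem _ hmem)
        exact List.nodup_cons.2 ⟨h1, (hnd.of_cons).of_cons⟩
      have ihx := ih x hxt
      have hm := (selPass_min x t).1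
      have hperm := selPass_perm x t
      simp only [selPass, if_neg h, inv]
      have hc : ((selPass x t).2.1 :: (selPass x t).2.2).countP (fun z => decide (z < y))
          = (x :: t).countP (fun z => decide (z < y)) := hperm.countP_eq _
      have hmy : decide ((selPass x t).2.1 < y) = true := by simp [lt_of_le_of_lt hm hxy]
      have hxy' : decide (x < y) = true := by simp [hxy]
      have hnotyx : decide (y < x) = false := by simp [not_lt.2 (le_of_lt hxy)]
      simp only [List.countP_cons, hmy, hxy', hnotyx, eq_self_iff_true, if_true,
        Bool.false_eq_true, if_false] at hc ⊢
      simp only [inv] at ihx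
      omega

lemma selSort_nil : selSort [] = (0, []) := by simp [selSort]

lemma selSort_cons (x : Int) (t : List Int) :
    selSort (x :: t) = ((selPass x t).1 + (selSort (selPass x t).2.2).1,
      (selPass x t).2.1 :: (selSort (selPass x t).2.2).2) := by
  rw [selSort]

lemma selSort_perm (l : List Int) : (selSort l).2.Perm l := by
  induction hn : l.length using Nat.strong_induction_on generalizing l with
  | _ n ih =>
    cases l with
    | nil => simp [selSort_nil]
    | cons x t =>
      rw [selSort_cons]
      have hp := ih (selPass x t).2.2.length (by simp only [selPass_len, ← hn, List.length_cons]; omega) _ rfl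
      exact (hp.cons _).trans (selPass_perm x t)

lemma selSort_sorted (l : List Int) (hnd : l.Nodup) : (selSort l).2.Pairwise (· < ·) := by
  induction hn : l.length using Nat.strong_induction_on generalizing l with
  | _ n ih =>
    cases l with
    | nil => simp [selSort_nil]
    | cons x t =>
      rw [selSort_cons]
      have hndp : ((selPass x t).2.1 :: (selPass x t).2.2).Nodup :=
        ((selPass_perm x t).nodup_iff).2 hnd
      have hnds : (selPass x t).2.2.Nodup := hndp.of_cons
      refine List.pairwise_cons.2 ⟨?_, ih (selPass x t).2.2.length (by simp only [selPass_len, ← hn, List.length_cons]; omega) _ hnds rfl⟩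
      intro z hz
      have hzmem : z ∈ (selPass x t).2.2 := (selSort_perm _).mem_iff.1 hz
      have hle := (selPass_min x t).2 z hzmem
      have hne : (selPass x t).2.1 ≠ z := fun he => (List.nodup_cons.1 hndp).1 (he ▸ hzmem)
      exact lt_of_le_of_ne hle hne

lemma selSort_count (l : List Int) (hnd : l.Nodup) : (selSort l).1 = inv l := by
  induction hn : l.length using Nat.strong_induction_on generalizing l with
  | _ n ih =>
    cases l with
    | nil => simp [selSort_nil, inv]
    | cons x t =>
      rw [selSort_cons]
      have hndp : ((selPass x t).2.1 :: (selPass x t).2.2).Nodup :=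
        ((selPass_perm x t).nodup_iff).2 hnd
      have hnds : (selPass x t).2.2.Nodup := hndp.of_cons
      have := ih (selPass x t).2.2.length (by simp only [selPass_len, ← hn, List.length_cons]; omega) _ hnds rfl
      rw [this]
      exact selPass_count x t hnd

lemma seg_cons (c : List Int) (jj n : Nat) (h1 : jj < n) (h2 : n ≤ c.length) :
    (c.take n).drop jj = c.getD jj 0 :: (c.take n).drop (jj+1) := by
  rw [List.drop_eq_getElem_cons (by simp; omega)]
  congr 1
  simp [List.getElem_take, List.getD_eq_getElem?_getD,
    List.getElem?_eq_getElem (show jj < c.length by omega)]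

lemma sortIn_bridge (N i : Int) (h0 : 0 ≤ i) :
    ∀ (d : Nat) (c : List Int) (num : Int) (j0 : Int), j0 = N - (d : Int) → i < j0 →
      N ≤ (c.length : Int) →
    aSortIn i (PySem.List.pyRange j0 N 1) (num, c) =
      (num + ((selPass (PySem.List.pyGetD c i 0) ((c.take N.toNat).drop j0.toNat)).1 : Int),
       c.take i.toNat ++
         (selPass (PySem.List.pyGetD c i 0) ((c.take N.toNat).drop j0.toNat)).2.1 ::
           ((c.take j0.toNat).drop (i.toNat+1)) ++
         (selPass (PySem.List.pyGetD c i 0) ((c.take N.toNat).drop j0.toNat)).2.2 ++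
         c.drop N.toNat) := by
  intro d
  induction d with
  | zero =>
    intro c num j0 hj0 hij0 hlen
    have hj0N : j0 = N := by omega
    subst hj0N
    have hseg : (c.take j0.toNat).drop j0.toNat = [] := by
      apply List.drop_eq_nil_of_le
      simp
    rw [PySem.List.pyRange_one_eq_nil (le_refl _), hseg]
    simp only [aSortIn, List.foldl_nil, selPass]
    have hx : PySem.List.pyGetD c i 0 = c.getD i.toNat 0 :=
      PySem.List.pyGetD_of_nonneg c 0 h0
    rw [hx]
    refine Prod.ext (by simp) ?_
    simp only []
    have := decomp_take_drop c i.toNat j0.toNat (by omega) (by omega)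
    conv_lhs => rw [this]
    simp

  | succ d ih =>
    intro c num j0 hj0 hij0 hlen
    have hj0N : j0 < N := by omega
    have h0j0 : 0 ≤ j0 := by omega
    have hj0len : j0 < (c.length : Int) := by omega
    have htn : (j0+1).toNat = j0.toNat + 1 := by omega
    have hjn : j0.toNat < N.toNat := by omega
    have hnlen : N.toNat ≤ c.length := by omega
    rw [PySem.List.pyRange_one_cons hj0N]
    simp only [aSortIn, List.foldl_cons]
    rw [seg_cons c j0.toNat N.toNat hjn hnlen]
    have hy : PySem.List.pyGetD c j0 0 = c.getD j0.toNat 0 :=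
      PySem.List.pyGetD_of_nonneg c 0 h0j0
    by_cases hcomp : PySem.List.pyGetD c j0 0 < PySem.List.pyGetD c i 0
    · -- swap case
      have hstep : aSortStep i (num, c) j0 =
          (num + 1, PySem.List.pySetD (PySem.List.pySetD c i (PySem.List.pyGetD c j0 0)) j0
            (PySem.List.pyGetD c i 0)) := by
        simp only [aSortStep, if_pos hcomp]
      rw [hstep]
      set c2 := PySem.List.pySetD (PySem.List.pySetD c i (PySem.List.pyGetD c j0 0)) j0
          (PySem.List.pyGetD c i 0) with hc2
      have hc2set : c2 = (c.set i.toNat (PySem.List.pyGetD c j0 0)).set j0.toNat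
          (PySem.List.pyGetD c i 0) := by
        rw [hc2, PySem.List.pySetD_of_nonneg _ _ h0, PySem.List.pySetD_of_nonneg _ _ h0j0]
      have hlen2 : c2.length = c.length := by simp [hc2set]
      have f1 : PySem.List.pyGetD c2 i 0 = PySem.List.pyGetD c j0 0 := by
        rw [hc2, pgSet_ne _ _ _ _ h0 h0j0 (by omega)]
        exact pgSet_self c i _ h0 (by omega)
      have f2 : (c2.take N.toNat).drop (j0.toNat + 1) = (c.take N.toNat).drop (j0.toNat + 1) := by
        rw [hc2set, List.take_set, List.take_set, List.drop_set_of_lt (by omega),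
          List.drop_set_of_lt (by omega)]
      have f3 : c2.take i.toNat = c.take i.toNat := by
        rw [hc2set, List.take_set_of_le (by omega), List.take_set_of_le (by omega)]
      have f4 : c2.drop N.toNat = c.drop N.toNat := by
        rw [hc2set, List.drop_set_of_lt (by omega), List.drop_set_of_lt (by omega)]
      have f5 : (c2.take (j0.toNat+1)).drop (i.toNat+1) =
          ((c.take j0.toNat).drop (i.toNat+1)) ++ [PySem.List.pyGetD c i 0] := by
        rw [take_succ_drop c2 (i.toNat+1) j0.toNat (by omega) (by omega)]
        congr 1
        · rw [hc2set, List.take_set_of_le (le_refl _), List.take_set, List.drop_set_of_lt (by omega)]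
        · congr 1
          rw [hc2set]
          simp [List.getD_eq_getElem?_getD, List.getElem?_set_self, (by omega : j0.toNat < c.length)]
      have hrec := ih c2 (num+1) (j0+1) (by omega) (by omega) (by rw [hlen2]; exact hlen)
      simp only [aSortIn] at hrec
      rw [hrec, f1, htn, f2, f3, f4, f5]
      simp only [selPass, if_pos (by rw [hy] at hcomp; exact hcomp)]
      rw [hy]
      refine Prod.ext (by push_cast; ring) ?_
      simp

    · -- no-swap case
      have hstep : aSortStep i (num, c) j0 = (num, c) := by
        simp only [aSortStep, if_neg hcomp]
      rw [hstep]
      have hrec := ih c num (j0+1) (by omega) (by omega) hlen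
      simp only [aSortIn] at hrec
      rw [hrec, htn]
      simp only [selPass, if_neg (by rw [hy] at hcomp; exact hcomp)]
      refine Prod.ext (by simp) ?_
      simp only []
      rw [take_succ_drop c (i.toNat+1) j0.toNat (by omega) (by omega)]
      simp

lemma split3_take (A : List Int) (m : Int) (pp B : List Int) (n : Nat)
    (hn : n = A.length + 1 + pp.length) :
    (A ++ m :: pp ++ B).take n = A ++ m :: pp ∧
    (A ++ m :: pp ++ B).drop n = B ∧
    (A ++ m :: pp ++ B).take (A.length+1) = A ++ [m] ∧
    (A ++ m :: pp).drop (A.length+1) = pp := by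
  have e1 : A ++ m :: pp ++ B = (A ++ m :: pp) ++ B := by simp
  have e2 : A ++ m :: pp ++ B = (A ++ [m]) ++ (pp ++ B) := by simp
  have e3 : A ++ m :: pp = (A ++ [m]) ++ pp := by simp
  have hl1 : n = (A ++ m :: pp).length := by simp; omega
  have hl2 : A.length + 1 = (A ++ [m]).length := by simp
  refine ⟨?_, ?_, ?_, ?_⟩
  · rw [e1, hl1, List.take_left]
  · rw [e1, hl1, List.drop_left]
  · rw [e2, hl2, List.take_left]
  · rw [e3, hl2, List.drop_left]

lemma sortLoop_bridge (N : Int) :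
    ∀ (d : Nat) (c : List Int) (num : Int) (i0 : Int), i0 = N - 1 - (d : Int) → 0 ≤ i0 →
      N ≤ (c.length : Int) →
    (PySem.List.pyRange i0 (N-1) 1).foldl
        (fun st i => aSortIn i (PySem.List.pyRange (i+1) N 1) st) (num, c) =
      (num + ((selSort ((c.take N.toNat).drop i0.toNat)).1 : Int),
       c.take i0.toNat ++ (selSort ((c.take N.toNat).drop i0.toNat)).2 ++ c.drop N.toNat) := by
  intro d
  induction d with
  | zero =>
    intro c num i0 hi0 h00 hlen
    have hi0N : i0 = N - 1 := by omega
    have hii : i0.toNat < N.toNat := by omega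
    have hnlen : N.toNat ≤ c.length := by omega
    rw [PySem.List.pyRange_one_eq_nil (by omega)]
    rw [seg_cons c i0.toNat N.toNat hii hnlen]
    have hnil : (c.take N.toNat).drop (i0.toNat + 1) = [] := by
      apply List.drop_eq_nil_of_le
      simp; omega
    rw [hnil]
    rw [selSort_cons]
    simp only [selPass, selSort_nil, List.foldl_nil]
    refine Prod.ext (by simp) ?_
    simp only []
    have := decomp_take_drop c i0.toNat N.toNat (by omega) (by omega)
    conv_lhs => rw [this]
    simp [hnil]
  | succ d ih =>
    intro c num i0 hi0 h00 hlen
    have hii1 : i0 < N - 1 := by omega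
    have hnlen : N.toNat ≤ c.length := by omega
    have hiin : i0.toNat < N.toNat := by omega
    rw [PySem.List.pyRange_one_cons hii1, List.foldl_cons]
    have hinner := sortIn_bridge N i0 h00 (d+1) c num (i0+1) (by push_cast; omega) (by omega) hlen
    rw [hinner]
    have htn1 : (i0+1).toNat = i0.toNat + 1 := by omega
    have hmid : (c.take (i0.toNat+1)).drop (i0.toNat+1) = [] :=
      List.drop_eq_nil_of_le (by simp)
    rw [htn1, hmid]
    rw [PySem.List.pyGetD_of_nonneg c 0 h00]
    set x := c.getD i0.toNat 0 with hxdef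
    set t0 := (c.take N.toNat).drop (i0.toNat+1) with ht0def
    set A := c.take i0.toNat with hAdef
    set m := (selPass x t0).2.1 with hmdef
    set pp := (selPass x t0).2.2 with hppdef
    set B := c.drop N.toNat with hBdef
    have hA : A.length = i0.toNat := by
      rw [hAdef, List.length_take]; omega
    have hpp : pp.length = N.toNat - (i0.toNat+1) := by
      rw [hppdef, selPass_len, ht0def, List.length_drop, List.length_take]; omega
    obtain ⟨s1, s2, s3, s4⟩ := split3_take A m pp B N.toNat (by rw [hA, hpp]; omega)
    have hlenc2 : (A ++ m :: pp ++ B).length = c.length := by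
      simp only [List.length_append, List.length_cons, hA, hpp, hBdef, List.length_drop]
      omega
    have hrec := ih (A ++ m :: pp ++ B) (num + ((selPass x t0).1 : Int)) (i0+1)
      (by push_cast; omega) (by omega) (by rw [hlenc2]; exact hlen)
    rw [htn1] at hrec
    rw [hA] at s3 s4
    rw [s1, s4, s3, s2] at hrec
    rw [show (A ++ [m] ++ pp ++ B : List Int) = A ++ m :: pp ++ B from by simp,
      hrec]
    rw [seg_cons c i0.toNat N.toNat hiin hnlen, ← hxdef, ← ht0def, selSort_cons]
    refine Prod.ext (by push_cast; ring) ?_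
    simp [hmdef, hppdef]

lemma aSort_eq (N : Int) (c : List Int) (h2 : 2 ≤ N) (hlen : N ≤ (c.length : Int))
    (hnd : (c.take N.toNat).Nodup) :
    aSort N c = ((-1 : Int) ^ inv (c.take N.toNat),
      (selSort (c.take N.toNat)).2 ++ c.drop N.toNat) := by
  unfold aSort aSortLoop
  have hb := sortLoop_bridge N (N-1).toNat c 0 0 (by push_cast; omega) (le_refl 0) hlen
  rw [hb]
  simp only [List.drop_zero, List.take_zero, List.nil_append, Int.toNat_zero, zero_add,
    Int.toNat_natCast, selSort_count _ hnd]

lemma bInv_eq_inv (l : List Int) : bInv l = inv l := by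
  induction l with
  | nil => rfl
  | cons x t ih =>
    simp only [bInv, List.length_cons, List.range_succ_eq_map, List.map_cons, List.map_map,
      List.sum_cons]
    have hmap : (List.range t.length).map
        ((fun k => (((x :: t).drop (k+1)).filter (fun y => y < (x :: t).getD k 0)).length) ∘
          Nat.succ) =
        (List.range t.length).map
          (fun k => ((t.drop (k+1)).filter (fun y => y < t.getD k 0)).length) :=
      List.map_congr_left (fun k _ => by simp [Function.comp, List.getD_cons_succ])
    rw [hmap]
    have ih' : ((List.range t.length).map
        (fun k => ((t.drop (k+1)).filter (fun y => y < t.getD k 0)).length)).sum = inv t := ih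
    rw [ih']
    simp [inv, List.countP_eq_length_filter]

lemma phase_eq (k : Nat) :
    (-1 : Int) ^ k = if PySem.Int.mod (k : Int) 2 ≠ 0 then -1 else 1 := by
  rw [PySem.Int.mod_eq_emod_of_pos (by norm_num : (0:Int) < 2)]
  rcases Nat.even_or_odd k with h | h
  · rw [h.neg_one_pow]
    have h2 : (k : Int) % 2 = 0 := Int.even_iff.mp (by exact_mod_cast h)
    simp [h2]
  · rw [h.neg_one_pow]
    have h2 : (k : Int) % 2 = 1 := Int.odd_iff.mp (by exact_mod_cast h)
    simp [h2]

-- ===== VERDICT (by name: the statement is the Claim_ definition above) =====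
theorem bandp_spec : Claim_equal_bandp := by
  intro p q r s N a _hdom hpre
  unfold Spec_bandp bandp bandp_alt
  rw [aRep_eq_bRep p q r s N a]
  rcases hb : bRep p q r s N a with ⟨c1, f⟩
  simp only []
  cases f with
  | false =>
    rw [aDup_char]
    simp
  | true =>
    have hN2 : 2 ≤ N := by
      by_contra h
      have h1 := bRep_of_le_one p q r s N a (by omega)
      rw [hb] at h1
      simp at h1
    have hNlen : N ≤ (a.length : Int) := by
      rcases hpre with h | h
      · exact h
      · omega
    have hc1len : c1.length = a.length := by
      have h1 := bRep_len p q r s N a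
      rw [hb] at h1
      exact h1
    have hNlenc : N ≤ (c1.length : Int) := by rw [hc1len]; exact hNlen
    have hslice : PySem.List.slice c1 none (some N) = c1.take N.toNat :=
      PySem.List.slice_to _ (by omega)
    have hslice2 : PySem.List.slice c1 (some N) none = c1.drop N.toNat :=
      PySem.List.slice_from _ (by omega)
    rw [aDup_char, hslice, hslice2]
    by_cases hdup : (c1.take N.toNat).Nodup
    · -- no duplicates: A sorts; B computes the inversion parity and sorts
      have hcond : ((PySem.List.pyRange 0 (N-1) 1).any (fun i => (PySem.List.pyRange (i+1) N 1).any
          (fun j => PySem.List.pyGetD c1 i 0 == PySem.List.pyGetD c1 j 0))) = false := by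
        rw [← Bool.not_eq_true]
        intro hx
        exact ((dup_iff_not_nodup N c1 hNlenc).1 hx) hdup
      rw [hcond]
      have hsetlen : ¬ ((PySem.Set.ofList (c1.take N.toNat)).length < (c1.take N.toNat).length) :=
        fun hx => ((set_len_lt_iff _).1 hx) hdup
      simp only [Bool.false_eq_true, if_false]
      rw [if_neg (by norm_num), if_neg (by simpa using hsetlen)]
      rw [aSort_eq N c1 hN2 hNlenc hdup]
      refine Prod.ext ?_ ?_
      · simp only []
        rw [bInv_eq_inv, phase_eq]
      · simp only []
        congr 1
        exact (PySem.List.sorted_eq_of_perm_of_pairwise_lt _ _ (fun x => x) (selSort_perm _)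
          (selSort_sorted _ hdup)).symm
    · -- duplicates among the first N entries: both return (0, c1)
      have hcond : ((PySem.List.pyRange 0 (N-1) 1).any (fun i => (PySem.List.pyRange (i+1) N 1).any
          (fun j => PySem.List.pyGetD c1 i 0 == PySem.List.pyGetD c1 j 0))) = true :=
        (dup_iff_not_nodup N c1 hNlenc).2 hdup
      have hsetlen : (PySem.Set.ofList (c1.take N.toNat)).length < (c1.take N.toNat).length :=
        (set_len_lt_iff _).2 hdup
      rw [hcond]
      rw [if_pos (show (true : Bool) = true from rfl), if_pos rfl, if_pos (Or.inr hsetlen)]
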